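-- pv_equiv track=rewrite | github.com/Rexy-Gamaliel/Cryptarithmetic | src/13519010_cryptarithmetic.py | IncrementVarConfiguration
-- ===== SOURCE A (Python) =====
-- def IncrementVarConfiguration(varDict):
--   # Meng-increment konfigurasi nilai variabel-variabel pada varDict
--   tempVarDict = varDict.copy()
--   for Var in tempVarDict:
--     currentVal = tempVarDict.get(Var)
--     if (currentVal == 9):
--       tempVarDict.update({Var: 0})
--     else:
--       currentVal += 1
--       tempVarDict.update({Var: currentVal})
--       break
--   return tempVarDict
-- ===== SOURCE B (Python) =====
-- def IncrementVarConfiguration(varDict):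
--   # Non-mutating slice-based odometer step: split off the leading run of 9s,
--   # zero it, increment the first non-9 entry, keep the tail unchanged.
--   items = list(varDict.items())
--   j = 0
--   n = len(items)
--   while j < n and items[j][1] == 9:
--     j += 1
--   zeros = [(k, 0) for k, _ in items[:j]]
--   rest = items[j:]
--   if rest:
--     k, v = rest[0]
--     rest = [(k, v + 1)] + rest[1:]
--   return dict(zeros + rest)
-- ===== Notes on version B (the rewrite author's own statement) =====
-- stated objective: alternative
-- what changed: A mutates a copied dict in a for-loop with a break; B is non-mutating: it finds the length of the leading run of 9-valued entries, maps that prefix to zeros, increments the first remaining entry and reassembles the dict from slices.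
import Mathlib
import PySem

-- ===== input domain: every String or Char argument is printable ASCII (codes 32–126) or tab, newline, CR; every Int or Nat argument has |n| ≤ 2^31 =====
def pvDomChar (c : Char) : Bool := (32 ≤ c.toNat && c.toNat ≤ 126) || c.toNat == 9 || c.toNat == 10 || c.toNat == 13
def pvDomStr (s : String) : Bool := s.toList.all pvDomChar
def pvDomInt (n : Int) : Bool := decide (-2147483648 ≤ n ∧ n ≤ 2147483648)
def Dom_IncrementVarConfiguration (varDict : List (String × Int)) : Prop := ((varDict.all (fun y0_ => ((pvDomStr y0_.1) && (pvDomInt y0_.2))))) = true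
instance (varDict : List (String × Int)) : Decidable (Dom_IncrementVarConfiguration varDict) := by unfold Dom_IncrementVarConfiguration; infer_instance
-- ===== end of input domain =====

-- B replaces A's mutate-a-copy loop with a break by a non-mutating slice reassembly
-- around the leading run of 9-valued entries (objective: alternative decomposition).

-- ===== PORT A =====
-- A copies the dict and walks its entries in insertion order, updating each value in
-- place: a 9 becomes 0 and the walk continues; the first non-9 value is incremented
-- and the loop breaks. On the assoc-list representation (unique keys, insertion
-- order) 'update({Var: v})' rewrites exactly the current entry, so the loop is this
-- structural recursion over the entry list.
def IncrementVarConfiguration (varDict : List (String × Int)) : List (String × Int) :=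
  loopA varDict
where
  loopA : List (String × Int) → List (String × Int)
    | [] => []
    | (k, v) :: rest =>
        if v == 9 then (k, 0) :: loopA rest          -- tempVarDict.update({Var: 0}); continue
        else (k, v + 1) :: rest                      -- tempVarDict.update({Var: v+1}); break

-- ===== PORT B =====
-- B: take the leading run of 9-valued entries (the while loop computing j), map it to
-- zeros, increment the head of the remainder, keep the tail; concatenate the slices.
def IncrementVarConfiguration_alt (varDict : List (String × Int)) : List (String × Int) :=
  let pre := varDict.takeWhile (fun p => p.2 == 9)    -- items[:j]
  let zeros := pre.map (fun p => (p.1, (0 : Int)))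
  match varDict.drop pre.length with                  -- rest = items[j:]
  | [] => zeros
  | (k, v) :: t => zeros ++ (k, v + 1) :: t

-- ===== PRECONDITION & SPEC =====
def Spec_IncrementVarConfiguration (varDict : List (String × Int)) (out : List (String × Int)) : Prop := out = IncrementVarConfiguration_alt varDict
instance (varDict : List (String × Int)) (out : List (String × Int)) : Decidable (Spec_IncrementVarConfiguration varDict out) := by unfold Spec_IncrementVarConfiguration; infer_instance

-- ===== CLAIM (what is proved, stated in full; the proofs are below) =====
def Claim_equal_IncrementVarConfiguration : Prop := ∀ (varDict : List (String × Int)), Dom_IncrementVarConfiguration varDict → Spec_IncrementVarConfiguration varDict (IncrementVarConfiguration varDict)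

-- ===== LEMMAS AND PROOFS =====
theorem alt_cons_nine (k : String) (rest : List (String × Int)) :
    IncrementVarConfiguration_alt ((k, 9) :: rest) =
      (k, 0) :: IncrementVarConfiguration_alt rest := by
  unfold IncrementVarConfiguration_alt
  simp only [List.takeWhile, beq_self_eq_true]
  cases h : rest.drop (rest.takeWhile (fun p => p.2 == 9)).length with
  | nil => simp [h]
  | cons q t => obtain ⟨k', v'⟩ := q; simp [h]

theorem incr_eq_alt : ∀ (l : List (String × Int)),
    IncrementVarConfiguration.loopA l = IncrementVarConfiguration_alt l := by
  intro l
  induction l with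
  | nil => rfl
  | cons p rest ih =>
    obtain ⟨k, v⟩ := p
    by_cases h : v = 9
    · subst h
      rw [alt_cons_nine]
      simp [IncrementVarConfiguration.loopA, ih]
    · have hb : (v == 9) = false := by simp [h]
      simp [IncrementVarConfiguration.loopA, IncrementVarConfiguration_alt,
            List.takeWhile, hb]

-- ===== VERDICT (by name: the statement is the Claim_ definition above) =====
theorem IncrementVarConfiguration_spec : Claim_equal_IncrementVarConfiguration := by
  intro varDict _
  show IncrementVarConfiguration varDict = IncrementVarConfiguration_alt varDict
  exact incr_eq_alt varDict
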